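-- pv_equiv track=rewrite | github.com/theletterjeff/text-message-sender | text_message_sender/helpers/transform_cell_number.py | _standardize_carrier
-- ===== SOURCE A (Python) =====
-- import string
--
-- def _standardize_carrier(carrier):
--     """Turn carrier names into lowercase,
--     remove extraneous characters and words"""
--     carrier_lower = carrier.lower()
--     replacement_values = [
--         *string.punctuation,
--         ' ',
--         'mobile',
--         'wireless',
--     ]
--     for i in replacement_values:
--         if i in carrier_lower:
--             carrier_lower = carrier_lower.replace(i, '')
--     return carrier_lower
-- ===== SOURCE B (Python) =====
-- import string
--
-- _REMOVED_CHARS = set(string.punctuation) | {' '}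
--
--
-- def _standardize_carrier(carrier):
--     """Turn carrier names into lowercase,
--     remove extraneous characters and words"""
--     kept = ''.join(c for c in carrier.lower() if c not in _REMOVED_CHARS)
--     return kept.replace('mobile', '').replace('wireless', '')
-- ===== Notes on version B (the rewrite author's own statement) =====
-- stated objective: simpler
-- what changed: Replaces A's 33 sequential guarded whole-string replace passes (one per punctuation character and the space) by a single character-level filter pass against a precomputed set, followed by the two word substitutions in A's original order.
import Mathlib
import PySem

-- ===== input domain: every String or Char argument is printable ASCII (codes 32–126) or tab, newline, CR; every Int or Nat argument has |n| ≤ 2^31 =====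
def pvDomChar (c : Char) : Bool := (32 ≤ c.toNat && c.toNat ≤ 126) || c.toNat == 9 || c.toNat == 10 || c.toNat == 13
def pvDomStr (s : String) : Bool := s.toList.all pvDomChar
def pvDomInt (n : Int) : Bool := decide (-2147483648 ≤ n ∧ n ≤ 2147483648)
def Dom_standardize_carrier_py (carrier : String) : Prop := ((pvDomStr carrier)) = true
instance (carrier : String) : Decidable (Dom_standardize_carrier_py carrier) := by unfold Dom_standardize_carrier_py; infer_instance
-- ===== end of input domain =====

-- B changes only the decomposition (one char-level filter pass instead of 33 guarded whole-string replaces, then the two word replacements); same return value, no speed claim.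

-- ===== PORT A =====
-- string.punctuation
def pvPunctuation : String := "!\"#$%&'()*+,-./:;<=>?@[\\]^_`{|}~"

def standardize_carrier_py (carrier : String) : String :=
  let replacementValues : List String :=
    pvPunctuation.toList.map (fun c => String.ofList [c]) ++ [" ", "mobile", "wireless"]
  replacementValues.foldl
    (fun s i => if PySem.Str.isIn i s then PySem.Str.replace s i "" else s)
    (PySem.Str.lower carrier)

-- ===== PORT B =====
-- set(string.punctuation) | {' '}  (a PySem.Set of chars, distinct elements)
def pvRemovedChars : List Char := "!\"#$%&'()*+,-./:;<=>?@[\\]^_`{|}~ ".toList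

def standardize_carrier_py_alt (carrier : String) : String :=
  let kept := String.ofList
    ((PySem.Str.lower carrier).toList.filter (fun c => !(pvRemovedChars.contains c)))
  PySem.Str.replace (PySem.Str.replace kept "mobile" "") "wireless" ""

-- ===== PRECONDITION & SPEC =====
def Spec_standardize_carrier_py (carrier : String) (out : String) : Prop := out = standardize_carrier_py_alt carrier
instance (carrier : String) (out : String) : Decidable (Spec_standardize_carrier_py carrier out) := by unfold Spec_standardize_carrier_py; infer_instance

-- ===== CLAIM (what is proved, stated in full; the proofs are below) =====
def Claim_equal_standardize_carrier_py : Prop := ∀ (carrier : String), Dom_standardize_carrier_py carrier → Spec_standardize_carrier_py carrier (standardize_carrier_py carrier)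

-- ===== LEMMAS AND PROOFS =====

-- [c] is an infix of l exactly when c is an element of l
theorem infix_singleton (c : Char) (l : List Char) : [c] <:+: l ↔ c ∈ l := by
  constructor
  · intro h
    exact List.singleton_sublist.mp h.sublist
  · intro h
    obtain ⟨l₁, l₂, rfl⟩ := List.append_of_mem h
    exact ⟨l₁, l₂, by simp⟩

-- replace.go with a single-char pattern and empty replacement is a filter
theorem go_single (c : Char) :
    ∀ (fuel : Nat) (l acc : List Char), l.length ≤ fuel →
      PySem.Chars.replace.go [c] [] fuel l acc = acc.reverse ++ l.filter (fun x => x != c) := by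
  intro fuel
  induction fuel with
  | zero =>
    intro l acc h
    have : l = [] := List.length_eq_zero_iff.mp (Nat.le_zero.mp h)
    subst this
    simp [PySem.Chars.replace.go]
  | succ n ih =>
    intro l acc h
    cases l with
    | nil => simp [PySem.Chars.replace.go]
    | cons a t =>
      by_cases hac : c = a
      · subst hac
        have hpf : List.isPrefixOf [c] (c :: t) = true := by simp [List.isPrefixOf]
        have ht : t.length ≤ n := by simp only [List.length_cons] at h; omega
        simp only [PySem.Chars.replace.go, hpf, if_true, List.length_cons, List.length_nil,
          List.drop_succ_cons, List.drop_zero, List.reverse_nil, List.nil_append]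
        rw [ih t acc ht]
        simp
      · have hpf : List.isPrefixOf [c] (a :: t) = false := by
          simp [List.isPrefixOf]
          intro h'
          exact hac h'
        simp only [PySem.Chars.replace.go, hpf]
        have ht : t.length ≤ n := by simp only [List.length_cons] at h; omega
        rw [ih t (a :: acc) ht]
        have hne : (a != c) = true := by
          simp [bne]
          intro h'
          first | exact hac h' | exact hac h'.symm
        simp [hne]

theorem replace_single (c : Char) (l : List Char) :
    PySem.Chars.replace l [c] [] = l.filter (fun x => x != c) := by
  unfold PySem.Chars.replace
  rw [if_neg (by simp)]
  simpa using go_single c l.length l [] le_rfl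

-- replace.go with empty replacement and an absent pattern is the identity
theorem go_notin (sub : List Char) :
    ∀ (fuel : Nat) (l acc : List Char), ¬ sub <:+: l →
      PySem.Chars.replace.go sub [] fuel l acc = acc.reverse ++ l := by
  intro fuel
  induction fuel with
  | zero => intro l acc _; simp [PySem.Chars.replace.go]
  | succ n ih =>
    intro l acc h
    cases l with
    | nil => simp [PySem.Chars.replace.go]
    | cons a t =>
      have hpre : List.isPrefixOf sub (a :: t) = false := by
        cases hp : List.isPrefixOf sub (a :: t) with
        | true => exact absurd (List.isPrefixOf_iff_prefix.mp hp).isInfix h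
        | false => rfl
      simp only [PySem.Chars.replace.go, hpre]
      rw [ih t (a :: acc) (fun h' => h (h'.trans (List.suffix_cons a t).isInfix))]
      simp

theorem replace_notin (sub l : List Char) (h : PySem.Chars.isIn sub l = false) :
    PySem.Chars.replace l sub [] = l := by
  have hninf : ¬ sub <:+: l := (PySem.Chars.isIn_eq_false_iff sub l).mp h
  have hsub : sub ≠ [] := by
    intro hnil; subst hnil; exact hninf List.nil_infix
  unfold PySem.Chars.replace
  rw [if_neg (by simpa using hsub)]
  simpa using go_notin sub l.length l [] hninf

-- one guarded single-char replacement step, at the String level, is a filter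
theorem strStep_single (c : Char) (s : String) :
    (if PySem.Str.isIn (String.ofList [c]) s then PySem.Str.replace s (String.ofList [c]) "" else s)
      = String.ofList (s.toList.filter (fun x => x != c)) := by
  by_cases h : PySem.Str.isIn (String.ofList [c]) s
  · rw [if_pos h]
    apply String.toList_inj.mp
    simp [PySem.Str.toList_replace, replace_single]
  · rw [if_neg h]
    have h' : PySem.Chars.isIn [c] s.toList = false := by
      have hb := Bool.of_not_eq_true h
      rwa [PySem.Str.isIn_eq, String.toList_ofList] at hb
    have hmem : c ∉ s.toList := fun hm =>
      ((PySem.Chars.isIn_eq_false_iff [c] s.toList).mp h') ((infix_singleton c s.toList).mpr hm)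
    have hfil : s.toList.filter (fun x => x != c) = s.toList := by
      apply List.filter_eq_self.mpr
      intro a ha
      simp [bne]
      intro hac; subst hac; exact hmem ha
    apply String.toList_inj.mp
    rw [String.toList_ofList, hfil]

-- one guarded word-replacement step equals the unguarded replace
theorem strStep_word (w s : String) :
    (if PySem.Str.isIn w s then PySem.Str.replace s w "" else s) = PySem.Str.replace s w "" := by
  by_cases h : PySem.Str.isIn w s
  · rw [if_pos h]
  · rw [if_neg h]
    apply String.toList_inj.mp
    rw [PySem.Str.toList_replace]
    have h' : PySem.Chars.isIn w.toList s.toList = false := by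
      rw [← PySem.Str.isIn_eq]; exact Bool.of_not_eq_true h
    simp [replace_notin w.toList s.toList h']

-- folding the guarded single-char steps over a char list is one filter pass
theorem fold_chars (L : List Char) (s : String) :
    L.foldl (fun s c => if PySem.Str.isIn (String.ofList [c]) s then PySem.Str.replace s (String.ofList [c]) "" else s) s
      = String.ofList (s.toList.filter (fun x => !(L.contains x))) := by
  induction L generalizing s with
  | nil =>
    simp only [List.foldl_nil, List.contains_nil, Bool.not_false, List.filter_true]
    apply String.toList_inj.mp; simp
  | cons a L ih =>
    rw [List.foldl_cons, strStep_single a s, ih]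
    congr 1
    rw [String.toList_ofList, List.filter_filter]
    apply List.filter_congr
    intro x _
    by_cases hx : x = a <;> simp [hx, bne, Bool.and_comm]

-- ===== VERDICT (by name: the statement is the Claim_ definition above) =====
set_option maxHeartbeats 1000000 in
theorem standardize_carrier_py_spec : Claim_equal_standardize_carrier_py := by
  intro carrier _
  unfold Spec_standardize_carrier_py standardize_carrier_py standardize_carrier_py_alt
  rw [List.foldl_append, List.foldl_map, fold_chars]
  have hsp : (" " : String) = String.ofList [' '] := by decide
  simp only [List.foldl_cons, List.foldl_nil]
  rw [hsp, strStep_single, strStep_word, strStep_word]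
  have key : List.filter (fun x => x != ' ')
      (String.ofList (List.filter (fun x => !(pvPunctuation.toList.contains x))
        (PySem.Str.lower carrier).toList)).toList
      = List.filter (fun c => !(pvRemovedChars.contains c)) (PySem.Str.lower carrier).toList := by
    rw [String.toList_ofList, List.filter_filter]
    apply List.filter_congr
    intro x _
    have hR : pvRemovedChars = pvPunctuation.toList ++ [' '] := by decide
    by_cases hx : x = ' '
    · simp [hR, hx]
    · simp [hR, hx, bne]
  rw [key]
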